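-- pv_equiv track=rewrite | github.com/MrBrantCode/unitest_baseline | mut_generate/mist_train_taco/taco_17095/solution.py | count_combinations
-- ===== SOURCE A (Python) =====
-- def count_combinations(n: int, s: int) -> int:
--     """
--     Counts the number of combinations of n different integers from 0 to 9 that add up to s.
--
--     Parameters:
--     n (int): The number of integers to be selected.
--     s (int): The target sum.
--
--     Returns:
--     int: The number of combinations that add up to s.
--     """
--     def dfs(depth: int, prev: int, sum: int) -> int:
--         if depth == n:
--             return 1 if sum == s else 0
--         ret = 0
--         for i in range(prev + 1, 10):
--             ret += dfs(depth + 1, i, sum + i)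
--         return ret
--
--     if n == 0 and s == 0:
--         return 0
--     return dfs(0, -1, 0)
-- ===== SOURCE B (Python) =====
-- def count_combinations(n: int, s: int) -> int:
--     """
--     Counts the number of combinations of n different integers from 0 to 9 that add up to s.
--
--     Bottom-up 0/1-knapsack DP over the ten digits: dp[c][t] = number of subsets of the
--     digits processed so far with c elements summing to t.  The answer is read off
--     dp[n][s], with out-of-range n or s yielding 0 directly.
--     """
--     dp = [[1 if (c == 0 and t == 0) else 0 for t in range(46)] for c in range(11)]
--     for d in range(10):
--         dp = [[dp[c][t] + (dp[c - 1][t - d] if c >= 1 and t >= d else 0)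
--                for t in range(46)] for c in range(11)]
--     if n == 0 and s == 0:
--         return 0
--     if 0 <= n <= 10 and 0 <= s <= 45:
--         return dp[n][s]
--     return 0
-- ===== Notes on version B (the rewrite author's own statement) =====
-- stated objective: alternative
-- what changed: Replaced A's recursive ordered-selection backtracking (dfs choosing each next larger digit) by an iterative bottom-up 0/1-knapsack DP table indexed by (count, partial sum), swept once over the ten digits, with the answer read from dp[n][s].
import Mathlib
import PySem

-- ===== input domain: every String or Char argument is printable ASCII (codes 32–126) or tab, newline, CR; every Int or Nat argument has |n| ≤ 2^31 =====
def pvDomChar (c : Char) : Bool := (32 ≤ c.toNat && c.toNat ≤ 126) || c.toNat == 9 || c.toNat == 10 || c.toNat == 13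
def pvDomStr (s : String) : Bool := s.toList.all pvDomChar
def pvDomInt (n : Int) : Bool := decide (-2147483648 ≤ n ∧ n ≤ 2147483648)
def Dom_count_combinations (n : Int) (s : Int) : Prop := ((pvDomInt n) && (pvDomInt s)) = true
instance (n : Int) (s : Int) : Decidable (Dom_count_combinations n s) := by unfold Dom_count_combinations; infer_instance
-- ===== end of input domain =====

-- B replaces A's recursive ordered-selection backtracking by an iterative bottom-up
-- 0/1-knapsack DP table indexed by (count, partial sum); alternative, not faster.

-- ===== PORT A =====
-- A's nested dfs(depth, prev, sum); the fuel parameter only makes the recursion structural: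
-- every call chain strictly increases prev from -1 towards 9, so with fuel 11 the 0-branch
-- is never reached (the proof never uses it).
def pvDfs (n s : Int) : Nat → Int → Int → Int → Int
  | 0, _, _, _ => 0
  | fuel+1, depth, prev, sum =>
    if depth = n then (if sum = s then 1 else 0)
    else (PySem.List.pyRange (prev + 1) 10 1).foldl
      (fun ret i => ret + pvDfs n s fuel (depth + 1) i (sum + i)) 0

def count_combinations (n : Int) (s : Int) : Int :=
  if n = 0 ∧ s = 0 then 0 else pvDfs n s 11 0 (-1) 0

-- ===== PORT B =====
-- dp[c][t]; inside the comprehensions every index is in range, so getD is exact for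
-- Python's dp[c][t] (the guard c >= 1 and t >= d keeps the subtracted indices in range).
def pvTbl (dp : List (List Int)) (c t : Nat) : Int := (dp.getD c []).getD t 0

def pvInit : List (List Int) :=
  (List.range 11).map (fun c => (List.range 46).map (fun t => if c = 0 ∧ t = 0 then 1 else 0))

def pvStep (dp : List (List Int)) (d : Nat) : List (List Int) :=
  (List.range 11).map (fun c => (List.range 46).map (fun t =>
    pvTbl dp c t + (if 1 ≤ c ∧ d ≤ t then pvTbl dp (c - 1) (t - d) else 0)))

def count_combinations_alt (n : Int) (s : Int) : Int :=
  let dp := (List.range 10).foldl pvStep pvInit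
  if n = 0 ∧ s = 0 then 0
  else if 0 ≤ n ∧ n ≤ 10 ∧ 0 ≤ s ∧ s ≤ 45 then pvTbl dp n.toNat s.toNat
  else 0

-- ===== PRECONDITION & SPEC =====
def Spec_count_combinations (n : Int) (s : Int) (out : Int) : Prop := out = count_combinations_alt n s
instance (n : Int) (s : Int) (out : Int) : Decidable (Spec_count_combinations n s out) := by unfold Spec_count_combinations; infer_instance

-- ===== CLAIM (what is proved, stated in full; the proofs are below) =====
def Claim_equal_count_combinations : Prop := ∀ (n : Int) (s : Int), Dom_count_combinations n s → Spec_count_combinations n s (count_combinations n s)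

-- ===== LEMMAS AND PROOFS =====

-- Reference count: pvS xs k t = number of subsequences of xs of length k and sum t.
def pvS : List Int → Int → Int → Int
  | [], k, t => if k = 0 ∧ t = 0 then 1 else 0
  | x :: xs, k, t => pvS xs (k - 1) (t - x) + pvS xs k t

theorem pvS_neg (xs : List Int) : ∀ (k t : Int), k < 0 → pvS xs k t = 0 := by
  induction xs with
  | nil => intro k t hk; simp [pvS]; omega
  | cons x xs ih =>
    intro k t hk
    simp [pvS, ih (k - 1) (t - x) (by omega), ih k t hk]

theorem pvS_zero (xs : List Int) : ∀ (t : Int), pvS xs 0 t = if t = 0 then 1 else 0 := by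
  induction xs with
  | nil => intro t; simp [pvS]
  | cons x xs ih =>
    intro t
    simp [pvS, pvS_neg xs (-1) (t - x) (by omega), ih t]

theorem pvS_negsum (xs : List Int) (hx : ∀ x ∈ xs, 0 ≤ x) :
    ∀ (k t : Int), t < 0 → pvS xs k t = 0 := by
  induction xs with
  | nil => intro k t ht; simp [pvS]; omega
  | cons x xs ih =>
    intro k t ht
    have hx0 : 0 ≤ x := hx x (by simp)
    have hx' : ∀ y ∈ xs, 0 ≤ y := fun y hy => hx y (by simp [hy])
    simp [pvS, ih hx' (k - 1) (t - x) (by omega), ih hx' k t ht]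

theorem pvS_bigsum (xs : List Int) (hx : ∀ x ∈ xs, 0 ≤ x) :
    ∀ (k t : Int), xs.sum < t → pvS xs k t = 0 := by
  induction xs with
  | nil => intro k t ht; simp at ht; simp [pvS]; omega
  | cons x xs ih =>
    intro k t ht
    have hx0 : 0 ≤ x := hx x (by simp)
    have hx' : ∀ y ∈ xs, 0 ≤ y := fun y hy => hx y (by simp [hy])
    simp only [List.sum_cons] at ht
    simp [pvS, ih hx' (k - 1) (t - x) (by omega), ih hx' k t (by omega)]

theorem pvS_long (xs : List Int) : ∀ (k t : Int), (xs.length : Int) < k → pvS xs k t = 0 := by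
  induction xs with
  | nil => intro k t hk; simp at hk; simp [pvS]; omega
  | cons x xs ih =>
    intro k t hk
    simp only [List.length_cons] at hk
    simp [pvS, ih (k - 1) (t - x) (by push_cast at hk ⊢; omega), ih k t (by push_cast at hk ⊢; omega)]

-- choosing the least element first: for k ≠ 0,
-- pvS (range a 10) k t = Σ_{i=a}^{9} pvS (range (i+1) 10) (k-1) (t-i)
theorem pvS_choose (k : Int) (hk : k ≠ 0) : ∀ (m : Nat) (a t : Int), (10 - a).toNat ≤ m →
    pvS (PySem.List.pyRange a 10 1) k t
      = ((PySem.List.pyRange a 10 1).map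
          (fun i => pvS (PySem.List.pyRange (i + 1) 10 1) (k - 1) (t - i))).sum := by
  intro m
  induction m with
  | zero =>
    intro a t h
    rw [PySem.List.pyRange_one_eq_nil (by omega)]
    simp [pvS, hk]
  | succ m ih =>
    intro a t h
    by_cases ha : a < 10
    · rw [PySem.List.pyRange_one_cons ha]
      simp only [List.map_cons, List.sum_cons, pvS]
      congr 1
      exact ih (a + 1) t (by omega)
    · rw [PySem.List.pyRange_one_eq_nil (by omega)]
      simp [pvS, hk]

theorem pvDfs_eq (n s : Int) : ∀ (fuel : Nat) (depth prev sum : Int),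
    (9 - prev).toNat < fuel →
    pvDfs n s fuel depth prev sum
      = pvS (PySem.List.pyRange (prev + 1) 10 1) (n - depth) (s - sum) := by
  intro fuel
  induction fuel with
  | zero => intro _ _ _ h; omega
  | succ f ih =>
    intro depth prev sum h
    rw [pvDfs]
    by_cases hd : depth = n
    · subst hd
      rw [if_pos rfl]
      rw [show depth - depth = 0 by ring, pvS_zero]
      by_cases hs : sum = s
      · simp [hs]
      · rw [if_neg hs, if_neg (by omega)]
    · rw [if_neg hd]
      have hcg : List.foldl (fun ret i => ret + pvDfs n s f (depth + 1) i (sum + i)) 0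
            (PySem.List.pyRange (prev + 1) 10 1)
          = List.foldl (fun ret i =>
              ret + pvS (PySem.List.pyRange (i + 1) 10 1) (n - depth - 1) (s - sum - i)) 0
            (PySem.List.pyRange (prev + 1) 10 1) := by
        apply PySem.List.foldl_congr_mem
        intro acc x hx
        rw [PySem.List.mem_pyRange_one] at hx
        rw [ih (depth + 1) x (sum + x) (by omega)]
        have e1 : n - (depth + 1) = n - depth - 1 := by ring
        have e2 : s - (sum + x) = s - sum - x := by ring
        rw [e1, e2]
      rw [hcg, PySem.List.foldl_add,
          pvS_choose (n - depth) (by omega) ((10 - (prev + 1)).toNat) (prev + 1) (s - sum) (le_refl _)]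
      simp

-- table access to a comprehension-built table
theorem pvTbl_build (f : Nat → Nat → Int) (c t : Nat) (hc : c < 11) (ht : t < 46) :
    pvTbl ((List.range 11).map (fun c => (List.range 46).map (fun t => f c t))) c t = f c t := by
  unfold pvTbl
  have h1 : ((List.range 11).map (fun c => (List.range 46).map (fun t => f c t))).getD c []
      = (List.range 46).map (fun t => f c t) := by
    rw [List.getD_eq_getElem _ _ (by simp [hc])]
    simp
  rw [h1, List.getD_eq_getElem _ _ (by simp [ht])]
  simp

-- the invariant: the table built from digit list ds tabulates pvS over those digits
def pvInv (dp : List (List Int)) (ds : List Nat) : Prop :=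
  ∀ c t : Nat, c < 11 → t < 46 →
    pvTbl dp c t = pvS (ds.map (Nat.cast : Nat → Int)) (c : Int) (t : Int)

theorem pvS_snoc (x : Int) : ∀ (xs : List Int) (k t : Int),
    pvS (xs ++ [x]) k t = pvS xs k t + pvS xs (k - 1) (t - x) := by
  intro xs
  induction xs with
  | nil => intro k t; simp only [List.nil_append, pvS]; exact add_comm _ _
  | cons y ys ih =>
    intro k t
    simp only [List.cons_append, pvS, ih]
    rw [show t - y - x = t - x - y from by ring]
    ring

theorem pvInv_init : pvInv pvInit [] := by
  intro c t hc ht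
  rw [pvInit, pvTbl_build _ c t hc ht]
  simp only [List.map_nil]; rw [pvS]
  by_cases h : c = 0 ∧ t = 0
  · simp [h.1, h.2]
  · rw [if_neg h, if_neg (by omega)]

theorem pvInv_step (dp : List (List Int)) (ds : List Nat) (d : Nat)
    (h : pvInv dp ds) : pvInv (pvStep dp d) (ds ++ [d]) := by
  intro c t hc ht
  rw [pvStep, pvTbl_build _ c t hc ht]
  have hnn : ∀ x ∈ ds.map (Nat.cast : Nat → Int), 0 ≤ x := by
    intro x hx
    simp only [List.mem_map] at hx
    obtain ⟨y, _, rfl⟩ := hx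
    exact Int.natCast_nonneg y
  rw [List.map_append, List.map_cons, List.map_nil, pvS_snoc]
  rw [h c t hc ht]
  by_cases hg : 1 ≤ c ∧ d ≤ t
  · rw [if_pos hg, h (c - 1) (t - d) (by omega) (by omega)]
    congr 2 <;> omega
  · rw [if_neg hg]
    have hz : pvS (ds.map (Nat.cast : Nat → Int)) ((c : Int) - 1) ((t : Int) - (d : Int)) = 0 := by
      rcases not_and_or.mp hg with h1 | h2
      · exact pvS_neg _ _ _ (by omega)
      · exact pvS_negsum _ hnn _ _ (by omega)
    rw [hz]

theorem pvInv_final : pvInv ((List.range 10).foldl pvStep pvInit) (List.range 10) := by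
  have key : ∀ k : Nat, pvInv ((List.range k).foldl pvStep pvInit) (List.range k) := by
    intro k
    induction k with
    | zero => simpa using pvInv_init
    | succ m ih =>
      rw [List.range_succ, List.foldl_append]
      simpa using pvInv_step _ _ m ih
  exact key 10

theorem pvRange_eq :
    PySem.List.pyRange 0 10 1 = (List.range 10).map (Nat.cast : Nat → Int) := by decide

-- ===== VERDICT (by name: the statement is the Claim_ definition above) =====
theorem count_combinations_spec : Claim_equal_count_combinations := by
  intro n s _
  unfold Spec_count_combinations count_combinations count_combinations_alt
  by_cases h : n = 0 ∧ s = 0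
  · simp [h]
  · rw [if_neg h, if_neg h]
    rw [pvDfs_eq n s 11 0 (-1) 0 (by norm_num)]
    rw [show (-1 : Int) + 1 = 0 from by norm_num, show n - 0 = n from by ring,
        show s - 0 = s from by ring, pvRange_eq]
    have hnn : ∀ x ∈ (List.range 10).map (Nat.cast : Nat → Int), 0 ≤ x := by
      intro x hx
      simp only [List.mem_map] at hx
      obtain ⟨y, _, rfl⟩ := hx
      exact Int.natCast_nonneg y
    by_cases hr : 0 ≤ n ∧ n ≤ 10 ∧ 0 ≤ s ∧ s ≤ 45
    · rw [if_pos hr]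
      rw [pvInv_final n.toNat s.toNat (by omega) (by omega)]
      congr 1 <;> omega
    · rw [if_neg hr]
      have hlen : ((List.range 10).map (Nat.cast : Nat → Int)).length = 10 := by simp
      have hsum : ((List.range 10).map (Nat.cast : Nat → Int)).sum = 45 := by decide
      rcases (by omega : n < 0 ∨ 10 < n ∨ s < 0 ∨ 45 < s) with h1 | h1 | h1 | h1
      · exact pvS_neg _ _ _ h1
      · exact pvS_long _ _ _ (by rw [hlen]; exact_mod_cast h1)
      · exact pvS_negsum _ hnn _ _ h1
      · exact pvS_bigsum _ hnn _ _ (by rw [hsum]; exact h1)
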